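-- pv_equiv track=rewrite | github.com/teacherSsamko/TIL | boj/boj17269_c.py | f
-- ===== SOURCE A (Python) =====
-- def f(lst):
--     tmp = []
--     for i in range(len(lst) - 1):
--         tmp.append((lst[i] + lst[i+1]) % 10)
--     if len(tmp) == 2:
--         return tmp
--     else:
--         return f(tmp)
-- ===== SOURCE B (Python) =====
-- def f(lst):
--     # Collapse-to-two via one binomial (Pascal) coefficient row and two dot products,
--     # instead of A's repeated pairwise-sum passes; return value only, lst is not mutated.
--     k = len(lst) - 2
--     row = [1]
--     for _ in range(k):
--         row = [1] + [(a + b) % 10 for a, b in zip(row, row[1:])] + [1]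
--     first = sum(c * x for c, x in zip(row, lst)) % 10
--     second = sum(c * x for c, x in zip(row, lst[1:])) % 10
--     return [first, second]
-- ===== Notes on version B (the rewrite author's own statement) =====
-- stated objective: alternative
-- what changed: A repeatedly collapses the list to adjacent-pair sums mod 10 until two elements remain; B computes the two answers directly as binomial-weighted dot products, building a single Pascal-triangle row of C(n-2,i) mod 10 and taking two dot products with the input.
import Mathlib
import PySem

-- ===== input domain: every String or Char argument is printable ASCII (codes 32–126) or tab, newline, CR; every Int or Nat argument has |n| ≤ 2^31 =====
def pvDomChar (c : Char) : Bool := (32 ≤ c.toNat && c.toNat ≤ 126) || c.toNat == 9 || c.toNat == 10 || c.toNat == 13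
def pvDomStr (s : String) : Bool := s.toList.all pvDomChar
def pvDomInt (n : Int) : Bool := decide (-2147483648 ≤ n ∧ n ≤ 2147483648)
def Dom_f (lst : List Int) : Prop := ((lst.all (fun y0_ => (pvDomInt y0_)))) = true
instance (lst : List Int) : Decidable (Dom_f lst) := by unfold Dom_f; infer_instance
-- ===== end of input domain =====

-- B replaces A's repeated pairwise-sum collapse by one Pascal row of binomial coefficients mod 10
-- and two dot products (objective: alternative; return value only — neither version mutates lst).

-- ===== PORT A =====
-- one pass of A's loop: tmp = []; for i in range(len(lst)-1): tmp.append((lst[i]+lst[i+1]) % 10)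
def fStep (l : List Int) : List Int :=
  (PySem.List.pyRange 0 ((l.length : Int) - 1) 1).foldl
    (fun tmp i =>
      tmp ++ [PySem.Int.mod (PySem.List.pyGetD l i 0 + PySem.List.pyGetD l (i + 1) 0) 10]) []

-- A's recursion, with fuel to make it total in Lean; under Pre_f (length ≥ 3) the fuel never runs out
def fGo : Nat → List Int → List Int
  | 0, _ => []
  | fuel + 1, l =>
    let tmp := fStep l
    if tmp.length = 2 then tmp else fGo fuel tmp

def f (lst : List Int) : List Int := fGo lst.length lst

-- ===== PORT B =====
def f_alt (lst : List Int) : List Int :=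
  let k : Int := (lst.length : Int) - 2
  let row := (PySem.List.pyRange 0 k 1).foldl
    (fun r _ => 1 :: (List.zipWith (fun a b => PySem.Int.mod (a + b) 10) r r.tail) ++ [1]) [1]
  let first := PySem.Int.mod (List.zipWith (fun c x => c * x) row lst).sum 10
  let second := PySem.Int.mod
    (List.zipWith (fun c x => c * x) row (PySem.List.slice lst (some 1) none)).sum 10
  [first, second]

-- ===== PRECONDITION & SPEC =====
-- A recurses forever (RecursionError) once the list has shrunk below 3 elements, so it only
-- returns on lists of length ≥ 3; Pre_f excludes exactly the inputs where A raises.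
def Pre_f (lst : List Int) : Prop := 3 ≤ lst.length
instance (lst : List Int) : Decidable (Pre_f lst) := by unfold Pre_f; infer_instance
def pvWitness_f : List Int := [1, 2, 3]

def Spec_f (lst : List Int) (out : List Int) : Prop := out = f_alt lst
instance (lst : List Int) (out : List Int) : Decidable (Spec_f lst out) := by unfold Spec_f; infer_instance

-- ===== CLAIM (what is proved, stated in full; the proofs are below) =====
def Claim_equal_f : Prop := ∀ (lst : List Int), Dom_f lst → Pre_f lst → Spec_f lst (f lst)

-- ===== LEMMAS AND PROOFS =====

-- the pure (emod) pairwise-sum pass, and the Pascal-row data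
def pstep (l : List Int) : List Int := List.zipWith (fun a b => (a + b) % 10) l l.tail
def nrow (r : List Int) : List Int := 1 :: pstep r ++ [1]
def R (k : Nat) : List Int := (List.range (k + 1)).map (fun i => ((k.choose i : Int)) % 10)
def PR (k : Nat) : List Int := (List.range (k + 1)).map (fun i => ((k.choose i : Int)))
def psum (l : List Int) : List Int := List.zipWith (· + ·) l l.tail
def dot (r l : List Int) : Int := (List.zipWith (fun c x => c * x) r l).sum

theorem pymod10 (x : Int) : PySem.Int.mod x 10 = x % 10 := by
  exact PySem.Int.mod_eq_emod_of_pos (by norm_num)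

theorem pstep_eq_map (l : List Int) :
    pstep l = (List.range (l.length - 1)).map
      (fun i => (l.getD i 0 + l.getD (i + 1) 0) % 10) := by
  have hlen : (pstep l).length = l.length - 1 := by
    simp only [pstep, List.length_zipWith, List.length_tail]; omega
  apply List.ext_getElem
  · simp [hlen]
  · intro i h1 h2
    rw [hlen] at h1
    simp only [pstep, List.getElem_zipWith, List.getElem_tail, List.getElem_map,
      List.getElem_range]
    rw [List.getD_eq_getElem l 0 (by omega), List.getD_eq_getElem l 0 (by omega)]

theorem fStep_eq_pstep (l : List Int) : fStep l = pstep l := by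
  unfold fStep
  rw [PySem.List.foldl_append_singleton_eq_map, PySem.List.pyRange_one, pstep_eq_map]
  simp only [List.map_map, sub_zero]
  have h1 : ((l.length : Int) - 1).toNat = l.length - 1 := by omega
  rw [h1]
  apply List.map_congr_left
  intro i hi
  simp only [Function.comp, zero_add, pymod10]
  have h2 : (i : Int) + 1 = ((i + 1 : Nat) : Int) := by push_cast; ring
  rw [h2, PySem.List.pyGetD_natCast, PySem.List.pyGetD_natCast]

-- the B-side row fold is iteration of nrow
theorem fold_nrow (m : Nat) (init : List Int) :
    (PySem.List.pyRange 0 (m : Int) 1).foldl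
      (fun r _ => 1 :: (List.zipWith (fun a b => (a + b) % 10) r r.tail) ++ [1])
      init = nrow^[m] init := by
  induction m generalizing init with
  | zero => rw [PySem.List.pyRange_one_eq_nil (by norm_num)]; rfl
  | succ m ih =>
    have hc : ((m + 1 : Nat) : Int) = (m : Int) + 1 := by push_cast; ring
    rw [hc, PySem.List.pyRange_one_succ_right (by positivity), List.foldl_append, ih,
      Function.iterate_succ_apply']
    simp only [List.foldl_cons, List.foldl_nil, nrow, pstep]

theorem row_eq_R (k : Nat) : nrow^[k] [1] = R k := by
  induction k with
  | zero => decide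
  | succ k ih =>
    rw [Function.iterate_succ_apply', ih]
    have hR : pstep (R k) = (List.range k).map
        (fun i => (((k.choose i : Int)) + ((k.choose (i + 1) : Int))) % 10) := by
      rw [pstep_eq_map]
      have hl : (R k).length = k + 1 := by simp [R]
      rw [hl]
      simp only [Nat.add_sub_cancel]
      apply List.map_congr_left
      intro i hi
      rw [List.mem_range] at hi
      rw [List.getD_eq_getElem (R k) 0 (by simp [R]; omega),
        List.getD_eq_getElem (R k) 0 (by simp [R]; omega)]
      simp only [R, List.getElem_map, List.getElem_range]
      rw [← Int.add_emod]
    have hpas : ∀ i, ((k.choose i : Int)) + ((k.choose (i + 1) : Int))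
        = (((k + 1).choose (i + 1) : Int)) := by
      intro i; rw [Nat.choose_succ_succ]; push_cast; ring
    simp only [nrow, hR]
    show (1 : Int) :: _ ++ [1] = R (k + 1)
    have : R (k + 1) = ((1 : Int) % 10) :: (List.range k).map
        (fun i => (((k + 1).choose (i + 1) : Int)) % 10) ++ [((1 : Int)) % 10] := by
      simp only [R]
      rw [List.range_succ, List.map_append, List.range_succ_eq_map]
      simp [Nat.choose_self, Nat.choose_zero_right, List.map_map, Function.comp]
    rw [this]
    norm_num
    intro i hi
    rw [hpas]

-- congruence machinery
theorem forall2_R_PR (k : Nat) : List.Forall₂ (Int.ModEq 10) (R k) (PR k) := by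
  simp only [R, PR]
  induction (List.range (k + 1)) with
  | nil => exact List.Forall₂.nil
  | cons x xs ih =>
    exact List.Forall₂.cons (Int.emod_emod_of_dvd _ dvd_rfl) ih

theorem forall2_pstep (l l' : List Int) (h : List.Forall₂ (Int.ModEq 10) l l') :
    List.Forall₂ (Int.ModEq 10) (pstep l) (psum l') := by
  induction h with
  | nil => exact List.Forall₂.nil
  | cons hab h ih =>
    rename_i a b as bs
    cases h with
    | nil => exact List.Forall₂.nil
    | cons hab2 h2 =>
      rename_i a2 b2 as2 bs2
      simp only [pstep, psum, List.tail_cons, List.zipWith_cons_cons] at ih ⊢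
      exact List.Forall₂.cons ((Int.emod_emod_of_dvd _ dvd_rfl).trans (hab.add hab2)) ih

theorem dot_cong {r r' l l' : List Int}
    (hr : List.Forall₂ (Int.ModEq 10) r r') (hl : List.Forall₂ (Int.ModEq 10) l l') :
    Int.ModEq 10 (dot r l) (dot r' l') := by
  induction hr generalizing l l' with
  | nil => exact Int.ModEq.refl 0
  | cons hab hr ih =>
    cases hl with
    | nil => exact Int.ModEq.refl 0
    | cons hxy hl2 =>
      simp only [dot, List.zipWith_cons_cons, List.sum_cons]
      exact (hab.mul hxy).add (ih hl2)

-- dot with a range-map row as a Finset sum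
theorem dot_map_range (g : Nat → Int) (m : Nat) (l : List Int) (h : m ≤ l.length) :
    dot ((List.range m).map g) l = ∑ i ∈ Finset.range m, g i * l.getD i 0 := by
  induction m generalizing g l with
  | zero => simp [dot]
  | succ m ih =>
    cases l with
    | nil => simp at h
    | cons x xs =>
      rw [List.range_succ_eq_map, List.map_cons, List.map_map]
      simp only [dot, List.zipWith_cons_cons, List.sum_cons]
      rw [Finset.sum_range_succ']
      simp only [List.length_cons] at h
      have ihx := ih (fun i => g (i + 1)) xs (by omega)
      simp only [dot] at ihx
      have hmap : (List.range m).map (g ∘ fun i => i + 1)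
          = (List.range m).map (fun i => g (i + 1)) := by
        apply List.map_congr_left; intro a _; rfl
      rw [hmap, ihx]
      have hg : ∀ i, (x :: xs).getD (i + 1) 0 = xs.getD i 0 := fun i => rfl
      simp only [hg]
      rw [show (x :: xs).getD 0 0 = x from rfl]
      ring

-- Pascal's identity for the weighted sums
theorem pascal_sum (k : Nat) (l : Nat → Int) :
    (∑ i ∈ Finset.range (k + 2), ((k + 1).choose i : Int) * l i)
      = ∑ i ∈ Finset.range (k + 1), (k.choose i : Int) * (l i + l (i + 1)) := by
  rw [Finset.sum_range_succ']
  have h1 : ∀ i, (((k + 1).choose (i + 1) : Int)) = (k.choose i : Int) + (k.choose (i + 1) : Int) := by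
    intro i; rw [Nat.choose_succ_succ]; push_cast; ring
  simp only [h1, Nat.choose_zero_right, Nat.cast_one, one_mul, add_mul]
  rw [Finset.sum_add_distrib]
  have h2 : ∑ i ∈ Finset.range (k + 1), (k.choose (i + 1) : Int) * l (i + 1)
      = ∑ i ∈ Finset.range k, (k.choose (i + 1) : Int) * l (i + 1) := by
    rw [Finset.sum_range_succ, Nat.choose_succ_self]
    simp
  have h3 : ∑ i ∈ Finset.range (k + 1), (k.choose i : Int) * (l i + l (i + 1))
      = ∑ i ∈ Finset.range (k + 1), ((k.choose i : Int) * l i + (k.choose i : Int) * l (i + 1)) := by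
    apply Finset.sum_congr rfl; intro i _; ring
  rw [h3, Finset.sum_add_distrib]
  rw [Finset.sum_range_succ' (fun i => (k.choose i : Int) * l i) k]
  simp only [Nat.choose_zero_right, Nat.cast_one, one_mul]
  rw [h2]
  ring

theorem psum_getD (l : List Int) (i : Nat) (h : i + 1 < l.length) :
    (psum l).getD i 0 = l.getD i 0 + l.getD (i + 1) 0 := by
  rw [List.getD_eq_getElem (psum l) 0 (by simp [psum]; omega),
    List.getD_eq_getElem l 0 (by omega), List.getD_eq_getElem l 0 (by omega)]
  simp [psum, List.getElem_zipWith, List.getElem_tail]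

theorem length_pstep (l : List Int) : (pstep l).length = l.length - 1 := by
  simp only [pstep, List.length_zipWith, List.length_tail]; omega

theorem length_psum (l : List Int) : (psum l).length = l.length - 1 := by
  simp only [psum, List.length_zipWith, List.length_tail]; omega

theorem core (k : Nat) (l : List Int) (h : k + 2 ≤ l.length) :
    dot (R k) (pstep l) % 10 = dot (R (k + 1)) l % 10 := by
  have hps : List.Forall₂ (Int.ModEq 10) (pstep l) (psum l) :=
    forall2_pstep l l (List.forall₂_same.2 fun x _ => Int.ModEq.refl x)
  have c1 : Int.ModEq 10 (dot (R k) (pstep l)) (dot (PR k) (psum l)) :=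
    dot_cong (forall2_R_PR k) hps
  have c2 : Int.ModEq 10 (dot (R (k + 1)) l) (dot (PR (k + 1)) l) :=
    dot_cong (forall2_R_PR (k + 1)) (List.forall₂_same.2 fun x _ => Int.ModEq.refl x)
  have e1 : dot (PR k) (psum l) = ∑ i ∈ Finset.range (k + 1),
      (k.choose i : Int) * (psum l).getD i 0 := by
    rw [PR, dot_map_range]
    rw [length_psum]; omega
  have e2 : dot (PR (k + 1)) l = ∑ i ∈ Finset.range (k + 2),
      ((k + 1).choose i : Int) * l.getD i 0 := by
    rw [PR, dot_map_range]
    omega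
  have e3 : ∑ i ∈ Finset.range (k + 1), (k.choose i : Int) * (psum l).getD i 0
      = ∑ i ∈ Finset.range (k + 1), (k.choose i : Int) * (l.getD i 0 + l.getD (i + 1) 0) := by
    apply Finset.sum_congr rfl
    intro i hi
    rw [Finset.mem_range] at hi
    rw [psum_getD l i (by omega)]
  have : dot (PR k) (psum l) = dot (PR (k + 1)) l := by
    rw [e1, e2, e3, pascal_sum]
  exact (c1.trans (this ▸ Int.ModEq.refl _)).trans c2.symm

theorem pstep_tail (l : List Int) : (pstep l).tail = pstep l.tail := by
  match l with
  | [] => rfl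
  | [a] => rfl
  | a :: b :: r => simp [pstep]

theorem main_go (m : Nat) : ∀ (l : List Int), l.length = m + 3 → ∀ fuel, m + 1 ≤ fuel →
    fGo fuel l = [dot (R (m + 1)) l % 10, dot (R (m + 1)) l.tail % 10] := by
  induction m with
  | zero =>
    intro l hlen fuel hf
    match fuel, hf with
    | t + 1, _ =>
      match l, hlen with
      | [a, b, c], _ =>
        show (if (fStep [a, b, c]).length = 2 then fStep [a, b, c]
          else fGo t (fStep [a, b, c])) = _
        rw [fStep_eq_pstep]
        norm_num [pstep, R, dot, List.range_succ]
  | succ m ih =>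
    intro l hlen fuel hf
    match fuel, hf with
    | t + 1, _ =>
      show (if (fStep l).length = 2 then fStep l else fGo t (fStep l)) = _
      rw [fStep_eq_pstep]
      rw [if_neg (by rw [length_pstep, hlen]; omega)]
      rw [ih (pstep l) (by rw [length_pstep, hlen]; omega) t (by omega)]
      rw [core (m + 1) l (by omega), pstep_tail, core (m + 1) l.tail (by simp [hlen])]

-- ===== VERDICT (by name: the statement is the Claim_ definition above) =====
theorem f_spec : Claim_equal_f := by
  intro lst _ hpre
  unfold Pre_f at hpre
  unfold Spec_f
  obtain ⟨m, hm⟩ : ∃ m, lst.length = m + 3 := ⟨lst.length - 3, by omega⟩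
  have hA : f lst = [dot (R (m + 1)) lst % 10, dot (R (m + 1)) lst.tail % 10] := by
    unfold f
    rw [hm]
    exact main_go m lst hm (m + 3) (by omega)
  have hk : (lst.length : Int) - 2 = ((m + 1 : Nat) : Int) := by rw [hm]; push_cast; ring
  have hB : f_alt lst = [dot (R (m + 1)) lst % 10, dot (R (m + 1)) lst.tail % 10] := by
    unfold f_alt
    simp only [hk, pymod10, PySem.List.slice_from_one]
    simp only [fold_nrow, row_eq_R, dot]
  rw [hA, hB]
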